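-- pv_equiv track=rewrite | github.com/kevincon/advent_of_code | 2018/day5/test.py | find_shortest_length_polymer_from_removing_one_unit_type
-- ===== SOURCE A (Python) =====
-- def do_units_react(unit1: str, unit2: str) -> bool:
--     return (unit1.lower() == unit2.lower()) and (unit1 != unit2)
--
-- def simplify(units_left: str) -> str:
--     result = ""
--
--     while True:
--         # Take the first two units from the units left to process
--         unit1, unit2, units_left = units_left[0:1], units_left[1:2], units_left[2:]
--         if unit1 == "":
--             return result
--         if unit2 == "":
--             return result + unit1
--
--         # If the two units react, pop the last unit from the result and add it to the front of the units left to process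
--         if do_units_react(unit1, unit2):
--             popped, result = result[-1:], result[:-1]
--             units_left = popped + units_left
--         else:
--             # Otherwise add the first unit to the end of the result and continue processing from the second unit
--             result += unit1
--             units_left = unit2 + units_left
--
-- def find_shortest_length_polymer_from_removing_one_unit_type(units: str) -> int:
--     """https://adventofcode.com/2018/day/5#part2"""
--     unit_set = set(units.lower())
--
--     simplified_lengths = []
--
--     for unit_to_remove in unit_set:
--         filtered_units = "".join(list(filter(lambda x: x.lower() != unit_to_remove, units)))
--         simplified = simplify(filtered_units)
--         simplified_lengths.append(len(simplified))
--
--     return min(simplified_lengths)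
-- ===== SOURCE B (Python) =====
-- def find_shortest_length_polymer_from_removing_one_unit_type(units: str) -> int:
--     """https://adventofcode.com/2018/day/5#part2 — stack-based reduction, one pass per candidate"""
--     def reduced_length(skip: str) -> int:
--         stack = []
--         for c in units:
--             if c.lower() == skip:
--                 continue
--             if stack and stack[-1] != c and stack[-1].lower() == c.lower():
--                 stack.pop()
--             else:
--                 stack.append(c)
--         return len(stack)
--
--     return min(reduced_length(u) for u in set(units.lower()))
-- ===== Notes on version B (the rewrite author's own statement) =====
-- stated objective: faster
-- what changed: Replaces A's quadratic simplify loop (string slicing plus pushing reacted units back onto the unprocessed input) with a single-pass stack reduction fused with the unit filter, one O(n) pass per candidate unit.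
import Mathlib
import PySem

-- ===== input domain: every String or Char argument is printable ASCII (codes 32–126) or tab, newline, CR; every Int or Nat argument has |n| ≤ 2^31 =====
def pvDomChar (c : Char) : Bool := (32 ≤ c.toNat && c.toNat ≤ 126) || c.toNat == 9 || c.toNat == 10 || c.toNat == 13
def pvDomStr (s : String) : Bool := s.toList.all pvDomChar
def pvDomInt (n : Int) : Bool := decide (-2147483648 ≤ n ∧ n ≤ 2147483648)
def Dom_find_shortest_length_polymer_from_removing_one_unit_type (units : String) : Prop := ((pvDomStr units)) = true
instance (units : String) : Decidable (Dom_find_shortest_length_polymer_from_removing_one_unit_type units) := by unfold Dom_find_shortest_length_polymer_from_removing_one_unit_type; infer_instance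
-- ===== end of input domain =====

-- B replaces A's quadratic slice-and-pushback simplify loop with a single-pass stack
-- reduction fused with the unit filter (objective: faster; one pass per candidate unit).


-- ===== PORT A =====
-- do_units_react on one-char strings, ported at Char level (s.lower() of a 1-char string = lowerChar)
def pvReact (unit1 unit2 : Char) : Bool :=
  (PySem.Chars.lowerChar unit1 == PySem.Chars.lowerChar unit2) && unit1 != unit2

-- simplify: the while-loop as recursion on (result, units_left); the pattern match is
-- units_left[0:1]/[1:2]/[2:] with the "" tests; result[-1:] / result[:-1] are PySem slices.
def pvSimplify : List Char → List Char → List Char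
  | result, [] => result
  | result, [unit1] => result ++ [unit1]
  | result, unit1 :: unit2 :: rest =>
    if pvReact unit1 unit2 then
      pvSimplify (PySem.List.slice result none (some (-1)))
                 (PySem.List.slice result (some (-1)) none ++ rest)
    else
      pvSimplify (result ++ [unit1]) (unit2 :: rest)
termination_by _ left => left.length
decreasing_by
  · simp [PySem.List.slice_from_neg_one]; omega
  · simp

def find_shortest_length_polymer_from_removing_one_unit_type (units : String) : Int :=
  -- unit_set = set(units.lower()); the loop appends len(simplify(filtered)) for each unit;
  -- min(...) raises ValueError on [] — excluded by Pre_ (units ≠ "")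
  (PySem.List.min?
    ((PySem.Set.ofList (PySem.Chars.lower units.toList)).foldl
      (fun acc unit_to_remove =>
        acc ++ [((pvSimplify []
          (units.toList.filter (fun x => PySem.Chars.lowerChar x != unit_to_remove))).length : Int)])
      [])
    (fun x => x)).getD 0

-- ===== PORT B =====
-- the stack update of Source B's inner loop (stack kept top-first)
def pvStackStep (stack : List Char) (c : Char) : List Char :=
  match stack with
  | t :: ts =>
    if t != c && (PySem.Chars.lowerChar t == PySem.Chars.lowerChar c) then ts else c :: t :: ts
  | [] => [c]

-- Source B's reduced_length: one pass, skipping the removed unit, otherwise updating the stack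
def pvReducedLength (units : List Char) (skip : Char) : Int :=
  ((units.foldl (fun stack c =>
      if PySem.Chars.lowerChar c == skip then stack else pvStackStep stack c) []).length : Int)

def find_shortest_length_polymer_from_removing_one_unit_type_alt (units : String) : Int :=
  (PySem.List.min?
    ((PySem.Set.ofList (PySem.Chars.lower units.toList)).map (pvReducedLength units.toList))
    (fun x => x)).getD 0

-- ===== PRECONDITION & SPEC =====
-- Pre_ excludes only the empty string, on which A's min([]) raises ValueError (B's min raises too).
def Pre_find_shortest_length_polymer_from_removing_one_unit_type (units : String) : Prop :=
  units.toList ≠ []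
instance (units : String) : Decidable (Pre_find_shortest_length_polymer_from_removing_one_unit_type units) := by unfold Pre_find_shortest_length_polymer_from_removing_one_unit_type; infer_instance
def pvWitness_find_shortest_length_polymer_from_removing_one_unit_type : String := "dabAcCaCBAcCcaDA"

def Spec_find_shortest_length_polymer_from_removing_one_unit_type (units : String) (out : Int) : Prop := out = find_shortest_length_polymer_from_removing_one_unit_type_alt units
instance (units : String) (out : Int) : Decidable (Spec_find_shortest_length_polymer_from_removing_one_unit_type units out) := by unfold Spec_find_shortest_length_polymer_from_removing_one_unit_type; infer_instance

-- ===== CLAIM (what is proved, stated in full; the proofs are below) =====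
def Claim_equal_find_shortest_length_polymer_from_removing_one_unit_type : Prop := ∀ (units : String), Dom_find_shortest_length_polymer_from_removing_one_unit_type units → Pre_find_shortest_length_polymer_from_removing_one_unit_type units → Spec_find_shortest_length_polymer_from_removing_one_unit_type units (find_shortest_length_polymer_from_removing_one_unit_type units)

-- ===== LEMMAS AND PROOFS =====

-- Source B's inline test is A's do_units_react with the conjuncts swapped
lemma pvStackStep_react (t c : Char) (ts : List Char) :
    pvStackStep (t :: ts) c = if pvReact t c then ts else c :: t :: ts := by
  simp [pvStackStep, pvReact, Bool.and_comm]

-- A's result string is exactly the reduction stack (in reverse): A's while-loop equals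
-- the left fold of pvStackStep, provided result is irreducible and its last unit does
-- not react with the next input unit — both invariants of A's loop.
lemma pvSimplify_eq_foldl : ∀ (n : ℕ) (l result : List Char), l.length ≤ n →
    result.IsChain (fun a b => pvReact a b = false) →
    (∀ a c, result.getLast? = some a → l.head? = some c → pvReact a c = false) →
    pvSimplify result l = (List.foldl pvStackStep result.reverse l).reverse := by
  intro n
  induction n with
  | zero =>
    intro l result hl _ _
    have : l = [] := List.length_eq_zero_iff.mp (Nat.le_zero.mp hl)
    subst this
    simp [pvSimplify]
  | succ n ih =>
    intro l result hl hchain hhead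
    match l with
    | [] => simp [pvSimplify]
    | [u1] =>
      rcases hr : result.reverse with _ | ⟨t, ts⟩
      · have : result = [] := by simpa using congrArg List.reverse hr
        subst this
        simp [pvSimplify, pvStackStep]
      · have hres : result = ts.reverse ++ [t] := by
          simpa using congrArg List.reverse hr
        subst hres
        have hf : pvReact t u1 = false := hhead t u1 (by simp) rfl
        simp [pvSimplify, pvStackStep_react, hf]
    | u1 :: u2 :: rest =>
      by_cases h : pvReact u1 u2 = true
      · -- the two units react: A pops, the fold pushes u1 then pops it
        rw [pvSimplify, if_pos h, PySem.List.slice_to_neg_one, PySem.List.slice_from_neg_one]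
        rcases hr : result.reverse with _ | ⟨t, ts⟩
        · have : result = [] := by simpa using congrArg List.reverse hr
          subst this
          have hrest : rest.length ≤ n := by simp at hl; omega
          simp only [List.dropLast_nil, List.length_nil, List.drop_nil, List.nil_append]
          rw [ih rest [] hrest (by simp) (by simp)]
          simp only [List.foldl_cons]
          rw [show pvStackStep [] u1 = [u1] from rfl, pvStackStep_react, if_pos h]
          simp
        · have hres : result = ts.reverse ++ [t] := by
            simpa using congrArg List.reverse hr
          subst hres
          have hdl : (ts.reverse ++ [t]).dropLast = ts.reverse := List.dropLast_concat
          have hdrop : (ts.reverse ++ [t]).drop ((ts.reverse ++ [t]).length - 1) = [t] := by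
            simp
          rw [hdl, hdrop, List.singleton_append]
          rw [List.isChain_append] at hchain
          obtain ⟨hc1, _, hc3⟩ := hchain
          have hlen : (t :: rest).length ≤ n := by simp at hl ⊢; omega
          rw [ih (t :: rest) ts.reverse hlen hc1
                (by intro a c ha hc
                    simp at hc; subst hc
                    exact hc3 a ha t rfl)]
          have hstep_ts : pvStackStep ts t = t :: ts := by
            rcases hts : ts with _ | ⟨s, ss⟩
            · rfl
            · have hs : ts.reverse.getLast? = some s := by simp [hts]
              have : pvReact s t = false := hc3 s hs t rfl
              rw [pvStackStep_react, if_neg (by simp [this])]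
          have hpush : pvStackStep (t :: ts) u1 = u1 :: t :: ts := by
            have : pvReact t u1 = false := hhead t u1 (by simp) rfl
            rw [pvStackStep_react, if_neg (by simp [this])]
          have hpop : pvStackStep (u1 :: t :: ts) u2 = t :: ts := by
            rw [pvStackStep_react, if_pos h]
          simp only [List.reverse_reverse, List.foldl_cons, hstep_ts, hpush, hpop]
      · -- no reaction: A appends u1, the fold pushes u1
        rw [pvSimplify, if_neg h]
        have hbool : pvReact u1 u2 = false := by
          revert h; cases pvReact u1 u2 <;> simp
        have hpush : pvStackStep result.reverse u1 = u1 :: result.reverse := by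
          rcases hr : result.reverse with _ | ⟨t, ts⟩
          · rfl
          · have hres : result = ts.reverse ++ [t] := by
              simpa using congrArg List.reverse hr
            have hlast : result.getLast? = some t := by rw [hres]; simp
            rw [pvStackStep_react, if_neg (by simp [hhead t u1 hlast rfl])]
        have hlen : (u2 :: rest).length ≤ n := by simp at hl ⊢; omega
        rw [ih (u2 :: rest) (result ++ [u1]) hlen
              (by rw [List.isChain_append]
                  refine ⟨hchain, by simp, ?_⟩
                  intro a ha c hc
                  simp at hc; subst hc
                  exact hhead a u1 ha rfl)
              (by intro a c ha hc
                  simp at ha hc; subst ha; subst hc; exact hbool)]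
        simp [hpush]

-- per candidate unit: A's filtered simplify has the same length as B's fused single pass
lemma pvLength_eq (units : List Char) (u : Char) :
    ((pvSimplify [] (units.filter (fun x => PySem.Chars.lowerChar x != u))).length : Int)
      = pvReducedLength units u := by
  have hsimp := pvSimplify_eq_foldl
      (units.filter (fun x => PySem.Chars.lowerChar x != u)).length
      (units.filter (fun x => PySem.Chars.lowerChar x != u)) [] le_rfl (by simp) (by simp)
  rw [pvReducedLength, hsimp]
  simp only [List.reverse_nil]
  rw [List.foldl_filter]
  rw [PySem.List.foldl_congr_mem units
      (fun x y => if (PySem.Chars.lowerChar y != u) = true then pvStackStep x y else x)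
      (fun stack c => if PySem.Chars.lowerChar c == u then stack else pvStackStep stack c)
      []
      (by intro stack c _
          by_cases hc : PySem.Chars.lowerChar c = u
          · simp [hc]
          · simp [hc])]
  simp

-- ===== VERDICT (by name: the statement is the Claim_ definition above) =====
theorem find_shortest_length_polymer_from_removing_one_unit_type_spec : Claim_equal_find_shortest_length_polymer_from_removing_one_unit_type := by
  intro units _ _
  unfold Spec_find_shortest_length_polymer_from_removing_one_unit_type
  unfold find_shortest_length_polymer_from_removing_one_unit_type
    find_shortest_length_polymer_from_removing_one_unit_type_alt
  rw [PySem.List.foldl_append_singleton_eq_map, List.nil_append]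
  rw [List.map_congr_left (fun u _ => pvLength_eq units.toList u)]
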